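-- pv_equiv track=rewrite | github.com/agent-fox-dev/agent-fox-v3 | tests/property/core/test_config_gen_props.py | _strip_comment_prefixes
-- ===== SOURCE A (Python) =====
-- def _strip_comment_prefixes(template: str) -> str:
--     """Remove '# ' prefix from lines that start with it."""
--     lines = template.split("\n")
--     result = []
--     for line in lines:
--         if line.startswith("# "):
--             result.append(line[2:])
--         elif line == "#":
--             result.append("")
--         else:
--             result.append(line)
--     return "\n".join(result)
-- ===== SOURCE B (Python) =====
-- def _strip_comment_prefixes(template: str) -> str:
--     """Single character-level pass: no split/join, a line-start flag instead."""
--     out = []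
--     at_start = True
--     i, n = 0, len(template)
--     while i < n:
--         c = template[i]
--         if at_start and c == "#":
--             nxt = template[i + 1] if i + 1 < n else None
--             if nxt == " ":
--                 i += 2
--                 at_start = False
--                 continue
--             if nxt is None or nxt == "\n":
--                 i += 1
--                 continue
--             out.append(c)
--             at_start = False
--             i += 1
--             continue
--         out.append(c)
--         at_start = c == "\n"
--         i += 1
--     return "".join(out)
-- ===== Notes on version B (the rewrite author's own statement) =====
-- stated objective: alternative
-- what changed: A splits the template into a list of lines, transforms each line in a loop with an accumulator list and joins them back; B makes a single character-level pass over the string with a line-start flag, dropping a comment prefix as it goes, with no split, join or intermediate list of lines.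
import Mathlib
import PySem

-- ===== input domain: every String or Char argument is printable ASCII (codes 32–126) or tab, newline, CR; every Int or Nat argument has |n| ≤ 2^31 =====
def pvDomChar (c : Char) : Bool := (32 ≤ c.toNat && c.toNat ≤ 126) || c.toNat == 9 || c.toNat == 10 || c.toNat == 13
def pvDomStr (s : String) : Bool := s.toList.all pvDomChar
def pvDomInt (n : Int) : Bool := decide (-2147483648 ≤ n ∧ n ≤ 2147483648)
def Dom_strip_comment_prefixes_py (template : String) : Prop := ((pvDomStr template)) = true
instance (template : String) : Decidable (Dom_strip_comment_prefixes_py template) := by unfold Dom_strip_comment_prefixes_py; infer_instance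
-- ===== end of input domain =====

-- B replaces A's split/transform/join over a list of lines by a single character-level
-- pass with a line-start flag (objective: alternative decomposition, same cost).

-- ===== PORT A =====
-- A: split on "\n", per-line branch ('# ' prefix dropped, a bare '#' line emptied), join back.
def strip_comment_prefixes_py (template : String) : String :=
  let lines := PySem.Chars.splitOn template.toList ['\n']
  let result := lines.foldl (fun acc line =>
    if PySem.Chars.startswith line ['#', ' '] then
      acc ++ [PySem.Chars.slice line (some 2) none]
    else if line = ['#'] then
      acc ++ [([] : List Char)]
    else
      acc ++ [line]) []
  String.ofList (PySem.Chars.join ['\n'] result)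

-- ===== PORT B =====
-- B: one pass over the characters; `atStart` says we are at the beginning of a line.
def altGo : Bool → List Char → List Char
  | _, [] => []
  | atStart, c :: rest =>
    if atStart && c == '#' then
      match _h : rest with
      | ' ' :: r => altGo false r
      | [] => []
      | '\n' :: _ => altGo true rest
      | _ => '#' :: altGo false rest
    else
      c :: altGo (c == '\n') rest
termination_by _ cs => cs.length
decreasing_by all_goals simp_all

def strip_comment_prefixes_py_alt (template : String) : String :=
  String.ofList (altGo true template.toList)

-- ===== PRECONDITION & SPEC =====
def Spec_strip_comment_prefixes_py (template : String) (out : String) : Prop := out = strip_comment_prefixes_py_alt template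
instance (template : String) (out : String) : Decidable (Spec_strip_comment_prefixes_py template out) := by unfold Spec_strip_comment_prefixes_py; infer_instance

-- ===== CLAIM (what is proved, stated in full; the proofs are below) =====
def Claim_equal_strip_comment_prefixes_py : Prop := ∀ (template : String), Dom_strip_comment_prefixes_py template → Spec_strip_comment_prefixes_py template (strip_comment_prefixes_py template)

-- ===== LEMMAS AND PROOFS =====

-- clean recursive characterisation of split("\n")
def pvSplit : List Char → List (List Char)
  | [] => [[]]
  | c :: rest => if c = '\n' then [] :: pvSplit rest else (pvSplit rest).modifyHead (c :: ·)

-- A's per-line transformation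
def aLine (line : List Char) : List Char :=
  if PySem.Chars.startswith line ['#', ' '] then line.drop 2
  else if line = ['#'] then []
  else line

-- the joined output, with the first line transformed only when b = true
def pvOut (b : Bool) : List (List Char) → List Char
  | [] => []
  | l :: ls => (if b then aLine l else l) ++ (if ls.isEmpty then [] else '\n' :: pvOut true ls)

theorem pvSplit_ne_nil (cs : List Char) : pvSplit cs ≠ [] := by
  induction cs with
  | nil => simp [pvSplit]
  | cons c rest ih =>
    simp only [pvSplit]
    split_ifs
    · simp
    · cases hx : pvSplit rest with
      | nil => exact absurd hx ih
      | cons a b => simp [List.modifyHead]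

theorem pvSplit_cons_ex (cs : List Char) : ∃ hd tl, pvSplit cs = hd :: tl := by
  cases hx : pvSplit cs with
  | nil => exact absurd hx (pvSplit_ne_nil cs)
  | cons a b => exact ⟨a, b, rfl⟩

theorem splitOn_go_eq (fuel : Nat) :
    ∀ (l cur : List Char) (accs : List (List Char)), l.length < fuel →
      PySem.Chars.splitOn.go ['\n'] fuel l cur accs =
        accs.reverse ++ (pvSplit l).modifyHead (cur.reverse ++ ·) := by
  induction fuel with
  | zero => intro l cur accs h; omega
  | succ fuel ih =>
    intro l cur accs h
    cases l with
    | nil =>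
      simp [PySem.Chars.splitOn.go, pvSplit, List.modifyHead]
    | cons c rest =>
      by_cases hc : c = '\n'
      · subst hc
        rw [show PySem.Chars.splitOn.go ['\n'] (fuel + 1) ('\n' :: rest) cur accs =
              PySem.Chars.splitOn.go ['\n'] fuel rest [] (cur.reverse :: accs) by
            simp [PySem.Chars.splitOn.go, List.isPrefixOf]]
        rw [ih rest [] (cur.reverse :: accs) (by simp at h ⊢; omega)]
        simp only [pvSplit]
        obtain ⟨hd, tl, hsp⟩ : ∃ hd tl, pvSplit rest = hd :: tl := by
          cases hx : pvSplit rest with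
          | nil => exact absurd hx (pvSplit_ne_nil rest)
          | cons a b => exact ⟨a, b, rfl⟩
        simp [hsp, List.modifyHead]
      · rw [show PySem.Chars.splitOn.go ['\n'] (fuel + 1) (c :: rest) cur accs =
              PySem.Chars.splitOn.go ['\n'] fuel rest (c :: cur) accs by
            simp [PySem.Chars.splitOn.go, List.isPrefixOf, Ne.symm hc]]
        rw [ih rest (c :: cur) accs (by simp at h ⊢; omega)]
        simp only [pvSplit, if_neg hc]
        obtain ⟨hd, tl, hsp⟩ : ∃ hd tl, pvSplit rest = hd :: tl := by
          cases hx : pvSplit rest with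
          | nil => exact absurd hx (pvSplit_ne_nil rest)
          | cons a b => exact ⟨a, b, rfl⟩
        simp [hsp, List.modifyHead]

theorem splitOn_eq_pvSplit (cs : List Char) :
    PySem.Chars.splitOn cs ['\n'] = pvSplit cs := by
  rw [show PySem.Chars.splitOn cs ['\n'] =
        PySem.Chars.splitOn.go ['\n'] (cs.length + 1) cs [] [] from rfl]
  rw [splitOn_go_eq (cs.length + 1) cs [] [] (by omega)]
  obtain ⟨hd, tl, hsp⟩ : ∃ hd tl, pvSplit cs = hd :: tl := by
    cases hx : pvSplit cs with
    | nil => exact absurd hx (pvSplit_ne_nil cs)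
    | cons a b => exact ⟨a, b, rfl⟩
  simp [hsp, List.modifyHead]

theorem aLine_nil : aLine [] = [] := by
  simp [aLine, PySem.Chars.startswith, List.isPrefixOf]

theorem aLine_hash_space (h : List Char) : aLine ('#' :: ' ' :: h) = h := by
  simp [aLine, PySem.Chars.startswith, List.isPrefixOf]

theorem aLine_hash : aLine ['#'] = [] := by
  simp [aLine, PySem.Chars.startswith, List.isPrefixOf]

theorem aLine_hash_other (d : Char) (h : List Char) (hd : d ≠ ' ') :
    aLine ('#' :: d :: h) = '#' :: d :: h := by
  simp [aLine, PySem.Chars.startswith, List.isPrefixOf, Ne.symm hd]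

theorem aLine_other (c : Char) (h : List Char) (hc : c ≠ '#') :
    aLine (c :: h) = c :: h := by
  simp [aLine, PySem.Chars.startswith, List.isPrefixOf, Ne.symm hc, hc]

theorem altGo_eq_pvOut (b : Bool) (cs : List Char) :
    altGo b cs = pvOut b (pvSplit cs) := by
  induction b, cs using altGo.induct with
  | case1 b => simp [altGo, pvSplit, pvOut, aLine_nil]
  | case2 atStart c hcond r ih =>
    simp only [Bool.and_eq_true, beq_iff_eq] at hcond
    obtain ⟨hb, hc⟩ := hcond
    subst hb; subst hc
    rw [show altGo true ('#' :: ' ' :: r) = altGo false r by simp [altGo]]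
    rw [ih]
    obtain ⟨hd, tl, hsp⟩ := pvSplit_cons_ex r
    simp [pvSplit, hsp, List.modifyHead, pvOut, aLine_hash_space]
  | case3 atStart c hcond =>
    simp only [Bool.and_eq_true, beq_iff_eq] at hcond
    obtain ⟨hb, hc⟩ := hcond
    subst hb; subst hc
    rw [show altGo true ['#'] = [] by simp [altGo]]
    simp [pvSplit, List.modifyHead, pvOut, aLine_hash]
  | case4 atStart c hcond tl' ih =>
    simp only [Bool.and_eq_true, beq_iff_eq] at hcond
    obtain ⟨hb, hc⟩ := hcond
    subst hb; subst hc
    rw [show altGo true ('#' :: '\n' :: tl') = altGo true ('\n' :: tl') by simp [altGo]]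
    rw [ih]
    obtain ⟨hd2, tl2, hsp⟩ := pvSplit_cons_ex tl'
    simp [pvSplit, hsp, List.modifyHead, pvOut, aLine_nil, aLine_hash]
  | case5 atStart c rest hcond h1 h2 h3 ih =>
    simp only [Bool.and_eq_true, beq_iff_eq] at hcond
    obtain ⟨hb, hc⟩ := hcond
    subst hb; subst hc
    cases rest with
    | nil => exact absurd rfl h2
    | cons d r =>
      have hds : d ≠ ' ' := fun he => h1 r (by rw [he])
      have hdn : d ≠ '\n' := fun he => h3 r (by rw [he])
      rw [show altGo true ('#' :: d :: r) = '#' :: altGo false (d :: r) by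
        rw [altGo.eq_def]; dsimp only
        rw [if_pos (by simp)]
        split <;> simp_all]
      rw [ih]
      obtain ⟨hd2, tl2, hsp⟩ := pvSplit_cons_ex r
      simp only [pvSplit, if_neg hdn, hsp, List.modifyHead]
      cases tl2 with
      | nil => simp [pvOut, aLine_hash_other d hd2 hds]
      | cons x xs => simp [pvOut, aLine_hash_other d hd2 hds]
  | case6 atStart c rest hcond ih =>
    rw [show altGo atStart (c :: rest) = c :: altGo (c == '\n') rest by
      rw [altGo.eq_def]; dsimp only
      rw [if_neg hcond]]
    rw [ih]
    by_cases hc : c = '\n'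
    · subst hc
      obtain ⟨hd2, tl2, hsp⟩ := pvSplit_cons_ex rest
      simp only [pvSplit, hsp, pvOut]
      cases atStart <;> simp [pvOut, aLine_nil]
    · have hcp : atStart = true → c ≠ '#' := by
        intro ha he
        exact hcond (by simp [ha, he])
      obtain ⟨hd2, tl2, hsp⟩ := pvSplit_cons_ex rest
      simp only [pvSplit, if_neg hc, hsp, List.modifyHead, pvOut,
        beq_iff_eq]
      cases atStart with
      | false => simp
      | true => simp [aLine_other c hd2 (hcp rfl)]

theorem join_map_aLine (ls : List (List Char)) (h : ls ≠ []) :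
    PySem.Chars.join ['\n'] (ls.map aLine) = pvOut true ls := by
  induction ls with
  | nil => exact absurd rfl h
  | cons l ls ih =>
    cases ls with
    | nil => simp [PySem.Chars.join_singleton, pvOut]
    | cons l' ls' =>
      have hih := ih (by simp)
      simp only [List.map_cons] at hih ⊢
      rw [PySem.Chars.join_cons_cons, hih]
      simp [pvOut]

-- ===== VERDICT (by name: the statement is the Claim_ definition above) =====
theorem strip_comment_prefixes_py_spec : Claim_equal_strip_comment_prefixes_py := by
  intro template _
  unfold Spec_strip_comment_prefixes_py strip_comment_prefixes_py strip_comment_prefixes_py_alt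
  have hbody : (fun (acc : List (List Char)) (line : List Char) =>
      if PySem.Chars.startswith line ['#', ' '] then
        acc ++ [PySem.Chars.slice line (some 2) none]
      else if line = ['#'] then
        acc ++ [([] : List Char)]
      else
        acc ++ [line]) = (fun acc line => acc ++ [aLine line]) := by
    funext acc line
    unfold aLine
    split_ifs <;> simp [PySem.List.slice_from]
  simp only [hbody, PySem.List.foldl_append_singleton_eq_map, List.nil_append]
  rw [splitOn_eq_pvSplit, join_map_aLine (pvSplit template.toList) (pvSplit_ne_nil _),
      ← altGo_eq_pvOut]
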